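-- pv_equiv track=rewrite | github.com/frvnkly/advent-of-code | 2024/day8/resonant_collinearity.py | locate_antennae
-- ===== SOURCE A (Python) =====
-- def locate_antennae(city_map):
--     antennae = {}
--     for i in range(len(city_map)):
--         for j in range(len(city_map[i])):
--             if city_map[i][j].isalnum():
--                 if city_map[i][j] in antennae:
--                     antennae[city_map[i][j]].append((i, j))
--                 else:
--                     antennae[city_map[i][j]] = [(i, j)]
--     return antennae
-- ===== SOURCE B (Python) =====
-- def locate_antennae(city_map):
--     flat = [(cell, (i, j))
--             for i, row in enumerate(city_map)
--             for j, cell in enumerate(row)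
--             if cell.isalnum()]
--     keys = dict.fromkeys(c for c, _ in flat)
--     return {c: [p for cc, p in flat if cc == c] for c in keys}
-- ===== Notes on version B (the rewrite author's own statement) =====
-- stated objective: alternative
-- what changed: Replaces incremental dict accumulation inside nested index loops by a collect-then-group pass: flatten all alnum cells into one (char, pos) list, dedup the chars in first-occurrence order, then build each group by filtering the flat list.
import Mathlib
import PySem

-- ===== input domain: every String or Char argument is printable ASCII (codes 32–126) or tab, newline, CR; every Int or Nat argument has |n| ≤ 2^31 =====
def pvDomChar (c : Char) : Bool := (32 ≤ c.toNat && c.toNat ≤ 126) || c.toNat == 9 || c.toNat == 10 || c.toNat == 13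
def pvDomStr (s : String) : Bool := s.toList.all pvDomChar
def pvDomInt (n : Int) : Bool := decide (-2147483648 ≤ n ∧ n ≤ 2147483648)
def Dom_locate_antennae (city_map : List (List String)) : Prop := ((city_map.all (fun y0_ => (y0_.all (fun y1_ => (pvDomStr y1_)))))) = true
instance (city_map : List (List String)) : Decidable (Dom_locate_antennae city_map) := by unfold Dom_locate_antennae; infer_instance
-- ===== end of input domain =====

-- B replaces A's incremental dict accumulation by a collect-then-group pass (alternative decomposition, not faster).

-- ===== PORT A =====
def locate_antennae (city_map : List (List String)) : List (String × List (Int × Int)) :=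
  ((PySem.List.pyRange 0 (PySem.List.len city_map) 1).foldl (fun d i =>
      let row := PySem.List.pyGetD city_map i []
      (PySem.List.pyRange 0 (PySem.List.len row) 1).foldl (fun d j =>
        let c := PySem.List.pyGetD row j ""
        if PySem.Str.strIsalnum c then
          if d.contains c then d.modify c [] (fun v => v ++ [(i, j)])
          else d.insert c [(i, j)]
        else d) d) PySem.Dict.empty).items

-- ===== PORT B =====
def locate_antennae_alt (city_map : List (List String)) : List (String × List (Int × Int)) :=
  let flat := (PySem.List.enumerate city_map 0).flatMap (fun ir =>
    ((PySem.List.enumerate ir.2 0).filter (fun jc => PySem.Str.strIsalnum jc.2)).map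
      (fun jc => (jc.2, (ir.1, jc.1))))
  let keys := PySem.List.dedup (flat.map (fun p => p.1))
  (keys.foldl (fun d c =>
    d.insert c ((flat.filter (fun p => p.1 == c)).map (fun p => p.2))) PySem.Dict.empty).items

-- ===== PRECONDITION & SPEC =====
def Spec_locate_antennae (city_map : List (List String)) (out : List (String × List (Int × Int))) : Prop := out = locate_antennae_alt city_map
instance (city_map : List (List String)) (out : List (String × List (Int × Int))) : Decidable (Spec_locate_antennae city_map out) := by unfold Spec_locate_antennae; infer_instance

-- ===== CLAIM (what is proved, stated in full; the proofs are below) =====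
def Claim_equal_locate_antennae : Prop := ∀ (city_map : List (List String)), Dom_locate_antennae city_map → Spec_locate_antennae city_map (locate_antennae city_map)

-- ===== LEMMAS AND PROOFS =====

-- the flat (char, position) list both sides group, in row-major order
def pvFlat (cm : List (List String)) : List (String × (Int × Int)) :=
  (PySem.List.enumerate cm 0).flatMap (fun ir =>
    ((PySem.List.enumerate ir.2 0).filter (fun jc => PySem.Str.strIsalnum jc.2)).map
      (fun jc => (jc.2, (ir.1, jc.1))))

theorem modify_eq_insert_of_not_contains {κ ν : Type} [BEq κ] (d : PySem.Dict κ ν) (k : κ) (d0 : ν) (f : ν → ν)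
    (h : d.contains k = false) : d.modify k d0 f = d.insert k (f d0) := by
  simp [PySem.Dict.modify, PySem.Dict.getD_of_not_contains d d0 h]

-- A's nested index loops are the grouping fold over the flat list
theorem portA_flat (cm : List (List String)) :
    locate_antennae cm =
      ((pvFlat cm).foldl (fun d p => d.modify p.1 [] (fun v => v ++ [p.2])) PySem.Dict.empty).items := by
  unfold locate_antennae pvFlat
  rw [List.foldl_flatMap]
  congr 1
  rw [PySem.List.enumerate_eq_map_pyRange cm ([] : List String), List.foldl_map]
  apply PySem.List.foldl_congr_mem
  intro d i _
  rw [List.foldl_map]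
  dsimp only
  rw [← PySem.List.foldl_if_eq_foldl_filter (fun jc : Int × String => PySem.Str.strIsalnum jc.2)
        (fun d jc => d.modify jc.2 [] fun v => v ++ [(i, jc.1)])
        (PySem.List.enumerate (PySem.List.pyGetD cm i [])) d,
      PySem.List.enumerate_eq_map_pyRange (PySem.List.pyGetD cm i []) "", List.foldl_map]
  apply PySem.List.foldl_congr_mem
  intro d j _
  dsimp only
  split_ifs with h1 h2
  · rfl
  · rw [modify_eq_insert_of_not_contains _ _ _ _ (by simp [h2])]; rfl
  · rfl

-- the grouping fold's items, read off key by key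
theorem dm_items (cm : List (List String)) :
    ((pvFlat cm).foldl (fun d p => d.modify p.1 [] (fun v => v ++ [p.2])) PySem.Dict.empty).items =
      (PySem.Set.ofList ((pvFlat cm).map (fun p => p.1))).map
        (fun c => (c, ((pvFlat cm).filter (fun p => p.1 == c)).map (fun p => p.2))) := by
  have hnd : ((pvFlat cm).foldl (fun d p => d.modify p.1 [] (fun v => v ++ [p.2])) PySem.Dict.empty).keys.Nodup := by
    apply PySem.Dict.nodup_keys_foldl_modify_key (pvFlat cm) (fun p => p.1) [] (fun _ p => fun v => v ++ [p.2])
    simp [PySem.Dict.keys_empty]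
  rw [PySem.Dict.items_eq_map_keys _ hnd ([]),
      PySem.Dict.keys_foldl_modify_key (pvFlat cm) (fun p => p.1) [] (fun _ p => fun v => v ++ [p.2]),
      PySem.Dict.keys_empty, PySem.Set.update_nil_left]
  apply List.map_congr_left
  intro c _
  rw [PySem.Dict.getD_foldl_modify_append]
  simp [PySem.Dict.getD_of_not_contains _ _ (PySem.Dict.contains_empty c)]

-- B's insert loop over the deduplicated (fresh, distinct) keys
theorem portB_items (cm : List (List String)) :
    locate_antennae_alt cm =
      (PySem.Set.ofList ((pvFlat cm).map (fun p => p.1))).map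
        (fun c => (c, ((pvFlat cm).filter (fun p => p.1 == c)).map (fun p => p.2))) := by
  simp only [locate_antennae_alt]
  rw [show ((PySem.List.enumerate cm 0).flatMap (fun ir =>
    ((PySem.List.enumerate ir.2 0).filter (fun jc => PySem.Str.strIsalnum jc.2)).map
      (fun jc => (jc.2, (ir.1, jc.1))))) = pvFlat cm from rfl]
  rw [PySem.Dict.items_foldl_insert_fresh _ (fun c => c)
        (fun c => ((pvFlat cm).filter (fun p => p.1 == c)).map (fun p => p.2)) PySem.Dict.empty
        (by intro a _; exact PySem.Dict.contains_empty a)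
        (by simp [PySem.List.dedup_eq_ofList])]
  simp [PySem.List.dedup_eq_ofList, PySem.Dict.empty]

-- ===== VERDICT (by name: the statement is the Claim_ definition above) =====
theorem locate_antennae_spec : Claim_equal_locate_antennae := by
  intro cm _
  unfold Spec_locate_antennae
  rw [portA_flat, dm_items, portB_items]
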